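-- pv_equiv track=rewrite | github.com/kimnamjun/CodingTest | 프로그래머스/코딩테스트 고득점 Kit/스택 큐/lvl2 기능개발.py | solution
-- ===== SOURCE A (Python) =====
-- import math
--
-- def solution(progresses, speeds):
--     answer = list()
--     days = [math.ceil((100 - val) / speeds[idx]) for idx, val in enumerate(progresses)]
--
--     idx = 0
--     while idx < len(days):
--         a = 1
--         b = days[idx]
--         idx += 1
--         while idx < len(days) and days[idx] <= b:
--             a += 1
--             idx += 1
--         answer.append(a)
--     return answer
-- ===== SOURCE B (Python) =====
-- import math
--
-- def solution(progresses, speeds):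
--     days = [math.ceil((100 - p) / speeds[i]) for i, p in enumerate(progresses)]
--     # pass 1: collect the indices where a new release group starts
--     starts = []
--     leader = None
--     for i, d in enumerate(days):
--         if leader is None or d > leader:
--             starts.append(i)
--             leader = d
--     # pass 2: group sizes are the gaps between consecutive boundaries
--     bounds = starts + [len(days)]
--     return [b - a for a, b in zip(bounds, bounds[1:])]
-- ===== Notes on version B (the rewrite author's own statement) =====
-- stated objective: alternative
-- what changed: Keeps A's days comprehension but replaces the nested while loops with a manually advanced shared index by two flat passes: one scan collecting the boundary indices where a new group starts (day exceeding the group leader), then the answer as gaps between consecutive boundaries.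
import Mathlib
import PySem

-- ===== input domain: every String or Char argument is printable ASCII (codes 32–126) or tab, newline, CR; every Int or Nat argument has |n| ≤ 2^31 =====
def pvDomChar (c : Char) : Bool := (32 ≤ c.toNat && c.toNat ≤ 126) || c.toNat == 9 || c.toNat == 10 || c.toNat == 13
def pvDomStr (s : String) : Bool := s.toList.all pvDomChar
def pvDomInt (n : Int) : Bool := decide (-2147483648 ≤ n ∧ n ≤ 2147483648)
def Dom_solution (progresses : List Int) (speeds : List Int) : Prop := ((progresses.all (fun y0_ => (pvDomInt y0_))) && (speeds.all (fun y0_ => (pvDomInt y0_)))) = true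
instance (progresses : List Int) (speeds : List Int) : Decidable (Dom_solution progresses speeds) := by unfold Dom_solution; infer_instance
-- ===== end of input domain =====

-- B keeps A's days comprehension but replaces A's nested while loops (shared index) by two
-- flat passes: collect group boundary indices, then emit the gaps between consecutive
-- boundaries (objective: alternative).

-- math.ceil((100 - v) / s) on this domain equals exact rational ceiling -((-a) // s)
def pyCeil (a b : Int) : Int := -(PySem.Int.floordiv (-a) b)

-- ===== PORT A =====
-- inner while: consume days ≤ b, counting in a
def innerA (b : Int) (a : Int) : List Int → Int × List Int
  | [] => (a, [])
  | d :: rest => if d ≤ b then innerA b (a + 1) rest else (a, d :: rest)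

theorem innerA_len_le (b a : Int) : ∀ l : List Int, (innerA b a l).2.length ≤ l.length := by
  intro l
  induction l generalizing a with
  | nil => simp [innerA]
  | cons d rest ih =>
    simp only [innerA]
    split
    · exact le_trans (ih (a + 1)) (Nat.le_succ _)
    · simp

-- outer while over days
def outerA : List Int → List Int
  | [] => []
  | b :: rest =>
    let p := innerA b 1 rest
    p.1 :: outerA p.2
termination_by l => l.length
decreasing_by
  simpa using Nat.lt_succ_of_le (innerA_len_le b 1 rest)

def solution (progresses : List Int) (speeds : List Int) : List Int :=
  outerA ((PySem.List.enumerate progresses).map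
    (fun iv => pyCeil (100 - iv.2) (PySem.List.pyGetD speeds iv.1 0)))

-- ===== PORT B =====
-- pass 1: for i, d in enumerate(days): record i when d starts a new group
def altStarts (l : List Int) (i : Int) (leader : Option Int) (starts : List Int) : List Int :=
  match l with
  | [] => starts
  | d :: rest =>
    match leader with
    | none => altStarts rest (i + 1) (some d) (starts ++ [i])
    | some b => if b < d then altStarts rest (i + 1) (some d) (starts ++ [i])
                else altStarts rest (i + 1) (some b) starts

-- pass 2: [b - a for a, b in zip(bounds, bounds[1:])]
def gapsB (bounds : List Int) : List Int :=
  (bounds.zip (bounds.drop 1)).map (fun ab => ab.2 - ab.1)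

def solution_alt (progresses : List Int) (speeds : List Int) : List Int :=
  let days := (PySem.List.enumerate progresses).map
    (fun iv => pyCeil (100 - iv.2) (PySem.List.pyGetD speeds iv.1 0))
  let starts := altStarts days 0 none []
  let bounds := starts ++ [(days.length : Int)]
  gapsB bounds

-- ===== PRECONDITION & SPEC =====
-- Pre_ excludes exactly the inputs where Python A (and B) raises: a speed of 0 used by the
-- comprehension (ZeroDivisionError) or progresses longer than speeds (IndexError).
def Pre_solution (progresses : List Int) (speeds : List Int) : Prop :=
  progresses.length ≤ speeds.length ∧ ∀ x ∈ speeds.take progresses.length, x ≠ 0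

instance (progresses : List Int) (speeds : List Int) : Decidable (Pre_solution progresses speeds) := by
  unfold Pre_solution; infer_instance

def pvWitness_solution : List Int × List Int := ([93, 30, 55], [1, 30, 5])

def Spec_solution (progresses : List Int) (speeds : List Int) (out : List Int) : Prop := out = solution_alt progresses speeds
instance (progresses : List Int) (speeds : List Int) (out : List Int) : Decidable (Spec_solution progresses speeds out) := by unfold Spec_solution; infer_instance

-- ===== CLAIM (what is proved, stated in full; the proofs are below) =====
def Claim_equal_solution : Prop := ∀ (progresses : List Int) (speeds : List Int), Dom_solution progresses speeds → Pre_solution progresses speeds → Spec_solution progresses speeds (solution progresses speeds)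

-- ===== LEMMAS AND PROOFS =====

theorem innerA_shift (b : Int) : ∀ (l : List Int) (a : Int),
    innerA b a l = (a + (innerA b 0 l).1, (innerA b 0 l).2) := by
  intro l
  induction l with
  | nil => intro a; simp [innerA]
  | cons d rest ih =>
    intro a
    simp only [innerA]
    split
    · rw [ih (a + 1), ih (0 + 1)]; ring_nf
    · simp

theorem innerA_count_eq (b : Int) : ∀ l : List Int,
    (innerA b 0 l).1 = (l.length : Int) - ((innerA b 0 l).2.length : Int) := by
  intro l
  induction l with
  | nil => simp [innerA]
  | cons d rest ih =>
    simp only [innerA, zero_add]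
    split
    · rw [innerA_shift b rest 1, ih]; push_cast [List.length_cons]; ring
    · simp

theorem altStarts_acc : ∀ (l : List Int) (i : Int) (lead : Option Int) (s : List Int),
    altStarts l i lead s = s ++ altStarts l i lead [] := by
  intro l
  induction l with
  | nil => intro i lead s; simp [altStarts]
  | cons d rest ih =>
    intro i lead s
    cases lead with
    | none =>
      simp only [altStarts]
      rw [ih _ _ (s ++ [i]), ih _ _ ([] ++ [i])]
      simp
    | some b =>
      simp only [altStarts]
      split
      · rw [ih _ _ (s ++ [i]), ih _ _ ([] ++ [i])]; simp
      · exact ih _ _ s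

theorem altStarts_bridge (b : Int) : ∀ (l : List Int) (i : Int),
    altStarts l i (some b) [] =
      altStarts (innerA b 0 l).2 (i + (innerA b 0 l).1) none [] := by
  intro l
  induction l with
  | nil => intro i; simp [altStarts, innerA]
  | cons d rest ih =>
    intro i
    by_cases h : d ≤ b
    · have hnb : ¬ b < d := not_lt.mpr h
      simp only [altStarts, innerA, if_pos h, if_neg hnb, zero_add, List.nil_append]
      rw [ih (i + 1), innerA_shift b rest 1]
      simp only
      congr 1
      ring
    · have hb : b < d := not_le.mp h
      simp only [altStarts, innerA, if_pos hb, if_neg h]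
      simp [altStarts_acc rest (i + 1) (some d) [i]]

theorem gapsB_cons2 (x y : Int) (t : List Int) :
    gapsB (x :: y :: t) = (y - x) :: gapsB (y :: t) := by
  simp [gapsB]

theorem altStarts_none_cons (d : Int) (t : List Int) (i : Int) :
    altStarts (d :: t) i none [] = i :: altStarts t (i + 1) (some d) [] := by
  rw [show altStarts (d :: t) i none [] = altStarts t (i + 1) (some d) [i] from rfl,
    altStarts_acc]
  rfl

theorem main_lemma : ∀ (n : Nat) (l : List Int), l.length ≤ n → ∀ i : Int,
    gapsB (altStarts l i none [] ++ [i + (l.length : Int)]) = outerA l := by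
  intro n
  induction n with
  | zero =>
    intro l hl i
    have : l = [] := List.eq_nil_of_length_eq_zero (Nat.le_zero.mp hl)
    subst this
    simp [altStarts, outerA, gapsB]
  | succ n ih =>
    intro l hl i
    cases l with
    | nil => simp [altStarts, outerA, gapsB]
    | cons b rest =>
      have hrest : rest.length ≤ n := Nat.lt_succ_iff.mp (by simpa using hl)
      have hlen := innerA_count_eq b rest
      have hr'le := innerA_len_le b 0 rest
      have houter : outerA (b :: rest) =
          (1 + (innerA b 0 rest).1) :: outerA (innerA b 0 rest).2 := by
        rw [outerA]
        simp only [innerA_shift b rest 1]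
      have hstarts : altStarts (b :: rest) i none [] =
          i :: altStarts (innerA b 0 rest).2 (i + 1 + (innerA b 0 rest).1) none [] := by
        rw [altStarts_none_cons, altStarts_bridge b rest (i + 1)]
      generalize hcr : innerA b 0 rest = cr at hlen hr'le houter hstarts
      obtain ⟨c, r'⟩ := cr
      dsimp only at hlen hr'le houter hstarts
      rw [hstarts, houter]
      have hend : i + ((b :: rest).length : Int) = (i + 1 + c) + (r'.length : Int) := by
        simp only [List.length_cons]
        push_cast
        omega
      rw [hend]
      have ihr := ih r' (le_trans hr'le hrest) (i + 1 + c)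
      cases r' with
      | nil =>
        simp only [altStarts, List.length_nil, Nat.cast_zero, add_zero]
        simp [gapsB, outerA]
        ring
      | cons d t =>
        rw [altStarts_none_cons] at ihr ⊢
        simp only [List.cons_append] at ihr ⊢
        simp only [gapsB_cons2]
        rw [ihr]
        congr 1
        ring

-- ===== VERDICT (by name: the statement is the Claim_ definition above) =====
theorem solution_spec : Claim_equal_solution := by
  intro p s _ _
  unfold Spec_solution solution solution_alt
  have := (main_lemma ((PySem.List.enumerate p).map
      (fun iv => pyCeil (100 - iv.2) (PySem.List.pyGetD s iv.1 0))).length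
    ((PySem.List.enumerate p).map
      (fun iv => pyCeil (100 - iv.2) (PySem.List.pyGetD s iv.1 0))) le_rfl 0).symm
  simpa using this
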